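-- pv_equiv track=rewrite | github.com/tibk/advent_of_code_2021 | day3/solutionB.py | get_filtered_rows
-- ===== SOURCE A (Python) =====
-- def get_count(idx, rows):
--     count = 0
--     for row in rows:
--         if row[idx] == "1":
--             count += 1
--         else:
--             count -= 1
--     return count
--
-- def get_filtered_rows(idx, rows, rev=False):
--     count = get_count(idx, rows)
--     if rev:
--         count *= -1
--     if count > 0 or (count == 0 and rev is False):
--         return [r for r in rows if r[idx] == "1"]
--     elif count < 0 or (count == 0 and rev is True):
--         return [r for r in rows if r[idx] == "0"]
-- ===== SOURCE B (Python) =====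
-- def get_filtered_rows(idx, rows, rev=False):
--     ones, zeros = [], []
--     for r in rows:
--         if r[idx] == "1":
--             ones.append(r)
--         elif r[idx] == "0":
--             zeros.append(r)
--     return ones if (2 * len(ones) >= len(rows)) != rev else zeros
-- ===== Notes on version B (the rewrite author's own statement) =====
-- stated objective: simpler
-- what changed: One pass partitioning rows into ones/zeros lists, then a single boolean comparison (2*len(ones) >= len(rows)) != rev selects the result, replacing the +/-1 counter helper plus a separate filter pass and the four-way sign/rev branch chain.
import Mathlib
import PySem

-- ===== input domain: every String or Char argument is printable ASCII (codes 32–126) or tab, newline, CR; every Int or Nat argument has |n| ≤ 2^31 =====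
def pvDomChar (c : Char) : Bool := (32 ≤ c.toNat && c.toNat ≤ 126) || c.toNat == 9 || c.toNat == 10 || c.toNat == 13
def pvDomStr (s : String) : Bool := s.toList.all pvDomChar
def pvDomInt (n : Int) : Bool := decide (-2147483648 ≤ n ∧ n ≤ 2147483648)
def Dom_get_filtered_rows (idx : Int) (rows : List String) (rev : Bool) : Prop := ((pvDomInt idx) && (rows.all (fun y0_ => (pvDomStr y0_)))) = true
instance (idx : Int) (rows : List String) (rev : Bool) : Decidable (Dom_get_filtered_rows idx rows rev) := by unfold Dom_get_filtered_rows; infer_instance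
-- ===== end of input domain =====

-- B replaces A's +/-1 counter helper plus a second filter pass by a single partitioning
-- pass and one boolean selection; objective: simpler. Equivalence of return values.

-- ===== PORT A =====
def get_count (idx : Int) (rows : List String) : Int :=
  rows.foldl (fun count row =>
    if PySem.Str.pyGet? row idx == some '1' then count + 1 else count - 1) 0

def get_filtered_rows (idx : Int) (rows : List String) (rev : Bool) : List String :=
  let count0 := get_count idx rows
  let count := if rev then count0 * (-1) else count0
  if count > 0 ∨ (count = 0 ∧ rev = false) then
    rows.filter (fun r => PySem.Str.pyGet? r idx == some '1')
  else if count < 0 ∨ (count = 0 ∧ rev = true) then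
    rows.filter (fun r => PySem.Str.pyGet? r idx == some '0')
  else []   -- unreachable: the two branches are exhaustive (Python would return None)

-- ===== PORT B =====
def get_filtered_rows_alt (idx : Int) (rows : List String) (rev : Bool) : List String :=
  let p := rows.foldl (fun (acc : List String × List String) r =>
    if PySem.Str.pyGet? r idx == some '1' then (acc.1 ++ [r], acc.2)
    else if PySem.Str.pyGet? r idx == some '0' then (acc.1, acc.2 ++ [r])
    else acc) ([], [])
  if decide (2 * p.1.length ≥ rows.length) != rev then p.1 else p.2

-- ===== PRECONDITION & SPEC =====
-- Pre_ excludes exactly the inputs where Python's row[idx] raises IndexError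
def Pre_get_filtered_rows (idx : Int) (rows : List String) (rev : Bool) : Prop :=
  ∀ r ∈ rows, PySem.Raise.InRange r.length idx
instance (idx : Int) (rows : List String) (rev : Bool) : Decidable (Pre_get_filtered_rows idx rows rev) := by unfold Pre_get_filtered_rows; infer_instance

def pvWitness_get_filtered_rows : Int × List String × Bool := (0, (["10", "01", "11"], false))

def Spec_get_filtered_rows (idx : Int) (rows : List String) (rev : Bool) (out : List String) : Prop := out = get_filtered_rows_alt idx rows rev
instance (idx : Int) (rows : List String) (rev : Bool) (out : List String) : Decidable (Spec_get_filtered_rows idx rows rev out) := by unfold Spec_get_filtered_rows; infer_instance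

-- ===== CLAIM (what is proved, stated in full; the proofs are below) =====
def Claim_equal_get_filtered_rows : Prop := ∀ (idx : Int) (rows : List String) (rev : Bool), Dom_get_filtered_rows idx rows rev → Pre_get_filtered_rows idx rows rev → Spec_get_filtered_rows idx rows rev (get_filtered_rows idx rows rev)

-- ===== LEMMAS AND PROOFS =====

theorem get_count_eq (idx : Int) (rows : List String) :
    get_count idx rows =
      2 * ((rows.filter (fun r => PySem.Str.pyGet? r idx == some '1')).length : Int)
        - rows.length := by
  unfold get_count
  suffices h : ∀ (c : Int), rows.foldl (fun count row =>
      if PySem.Str.pyGet? row idx == some '1' then count + 1 else count - 1) c =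
      c + 2 * ((rows.filter (fun r => PySem.Str.pyGet? r idx == some '1')).length : Int)
        - rows.length by
    simpa using h 0
  induction rows with
  | nil => intro c; simp
  | cons r rs ih =>
    intro c
    rw [List.foldl_cons, List.filter_cons]
    by_cases h : (PySem.Str.pyGet? r idx == some '1') = true
    · rw [if_pos h, ih, if_pos h]
      simp only [List.length_cons]; push_cast; ring
    · rw [if_neg h, ih, if_neg h]
      simp only [List.length_cons]; push_cast; ring

theorem partition_eq (idx : Int) (rows : List String) :
    ∀ (acc : List String × List String),
      rows.foldl (fun (acc : List String × List String) r =>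
        if PySem.Str.pyGet? r idx == some '1' then (acc.1 ++ [r], acc.2)
        else if PySem.Str.pyGet? r idx == some '0' then (acc.1, acc.2 ++ [r])
        else acc) acc =
      (acc.1 ++ rows.filter (fun r => PySem.Str.pyGet? r idx == some '1'),
       acc.2 ++ rows.filter (fun r => PySem.Str.pyGet? r idx == some '0')) := by
  induction rows with
  | nil => intro acc; simp
  | cons r rs ih =>
    intro acc
    rw [List.foldl_cons, List.filter_cons, List.filter_cons]
    by_cases h1 : (PySem.Str.pyGet? r idx == some '1') = true
    · have h0 : ¬ (PySem.Str.pyGet? r idx == some '0') = true := by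
        simp only [beq_iff_eq] at h1 ⊢
        have h1' : PySem.List.pyGet? r.toList idx = some '1' := h1
        simp [h1']
      rw [if_pos h1, if_pos h1, if_neg h0, ih]
      simp
    · by_cases h0 : (PySem.Str.pyGet? r idx == some '0') = true
      · rw [if_neg h1, if_pos h0, if_neg h1, if_pos h0, ih]
        simp
      · rw [if_neg h1, if_neg h1, if_neg h0, if_neg h0, ih]

theorem select_eq (o n : Nat) (rev : Bool) (x y : List String) :
    (if (if rev then (2 * (o : Int) - n) * (-1) else 2 * (o : Int) - n) > 0 ∨
        ((if rev then (2 * (o : Int) - n) * (-1) else 2 * (o : Int) - n) = 0 ∧ rev = false) then x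
     else if (if rev then (2 * (o : Int) - n) * (-1) else 2 * (o : Int) - n) < 0 ∨
        ((if rev then (2 * (o : Int) - n) * (-1) else 2 * (o : Int) - n) = 0 ∧ rev = true) then y
     else []) =
    (if decide (2 * o ≥ n) != rev then x else y) := by
  cases rev <;> by_cases hc : n ≤ 2 * o <;>
    simp [hc] <;> split_ifs <;> first | rfl | (exfalso; omega) | omega

-- ===== VERDICT (by name: the statement is the Claim_ definition above) =====
theorem get_filtered_rows_spec : Claim_equal_get_filtered_rows := by
  intro idx rows rev _ _
  unfold Spec_get_filtered_rows get_filtered_rows get_filtered_rows_alt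
  rw [get_count_eq, partition_eq]
  simp only [List.nil_append]
  exact select_eq _ _ rev _ _
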